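-- pv_equiv track=rewrite | github.com/Futty93/Callsign-Extraction | utils/sentence_formatter.py | insert_space_before_number
-- ===== SOURCE A (Python) =====
-- def insert_space_before_number(word: str) -> str:
--     """
--     Insert a space before the first digit in the given word.
--     数字の前にスペースを挿入する。
--
--     Parameters
--     ----------
--     word : str
--         The word to be processed.
--
--     Returns
--     -------
--     str
--         The processed word with a space inserted before the first digit.
--     """
--     if word.isdigit():
--         return word
--
--     result = ''
--     digit_found = False
--     for char in word:
--         if char.isdigit() and not digit_found:
--             result += ' ' + char
--             digit_found = True
--         else:
--             result += char
--     return result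
-- ===== SOURCE B (Python) =====
-- def insert_space_before_number(word: str) -> str:
--     if word.isdigit():
--         return word
--     i = next((i for i, c in enumerate(word) if c.isdigit()), None)
--     if i is None:
--         return word
--     return word[:i] + ' ' + word[i:]
-- ===== Notes on version B (the rewrite author's own statement) =====
-- stated objective: simpler
-- what changed: Locates the first digit's index in one scan and splices the space in with two slices, instead of rebuilding the string character by character with a digit_found flag.
import Mathlib
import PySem

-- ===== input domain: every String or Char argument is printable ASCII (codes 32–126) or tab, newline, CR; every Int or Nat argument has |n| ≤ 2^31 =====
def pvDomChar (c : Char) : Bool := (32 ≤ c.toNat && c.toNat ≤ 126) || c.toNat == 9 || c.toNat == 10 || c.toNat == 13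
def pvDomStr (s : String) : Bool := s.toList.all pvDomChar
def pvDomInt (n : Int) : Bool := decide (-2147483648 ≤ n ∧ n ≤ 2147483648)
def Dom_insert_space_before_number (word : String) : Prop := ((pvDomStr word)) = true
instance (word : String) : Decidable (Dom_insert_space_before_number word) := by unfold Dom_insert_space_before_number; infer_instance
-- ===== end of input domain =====

-- B locates the first digit with a single index scan and splices in the space via two slices,
-- instead of A's character-by-character rebuild with a digit_found flag (objective: simpler).


-- ===== PORT A =====
-- the loop body of A: result += ' ' + char (setting digit_found) or result += char
def pvStepA (st : List Char × Bool) (c : Char) : List Char × Bool :=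
  if PySem.Chars.isdigit c && !st.2 then (st.1 ++ [' ', c], true)
  else (st.1 ++ [c], st.2)

def insert_space_before_number (word : String) : String :=
  if PySem.Str.strIsdigit word then word
  else String.mk (word.toList.foldl pvStepA ([], false)).1

-- ===== PORT B =====
def insert_space_before_number_alt (word : String) : String :=
  if PySem.Str.strIsdigit word then word
  else
    match word.toList.findIdx? PySem.Chars.isdigit with
    | none => word
    | some i => String.mk (word.toList.take i ++ ' ' :: word.toList.drop i)

-- ===== PRECONDITION & SPEC =====
def Spec_insert_space_before_number (word : String) (out : String) : Prop := out = insert_space_before_number_alt word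
instance (word : String) (out : String) : Decidable (Spec_insert_space_before_number word out) := by unfold Spec_insert_space_before_number; infer_instance

-- ===== CLAIM (what is proved, stated in full; the proofs are below) =====
def Claim_equal_insert_space_before_number : Prop := ∀ (word : String), Dom_insert_space_before_number word → Spec_insert_space_before_number word (insert_space_before_number word)

-- ===== LEMMAS AND PROOFS =====

-- once digit_found is true, A's loop just appends the rest
theorem pvFoldA_true (l : List Char) (acc : List Char) :
    l.foldl pvStepA (acc, true) = (acc ++ l, true) := by
  induction l generalizing acc with
  | nil => simp
  | cons c cs ih => simp [pvStepA, ih]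

-- no digit in l: A's loop copies l verbatim
theorem pvFoldA_none (l : List Char) (acc : List Char)
    (h : l.findIdx? PySem.Chars.isdigit = none) :
    l.foldl pvStepA (acc, false) = (acc ++ l, false) := by
  induction l generalizing acc with
  | nil => simp
  | cons c cs ih =>
    rw [List.findIdx?_cons] at h
    by_cases hc : PySem.Chars.isdigit c = true
    · simp [hc] at h
    · simp only [hc, if_neg, Bool.false_eq_true, not_false_eq_true, ite_false] at h ⊢
      simp only [List.foldl_cons, pvStepA, hc, Bool.false_and, Bool.false_eq_true, if_neg,
        not_false_eq_true]
      rw [ih (acc ++ [c]) (by simpa using h)]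
      simp

-- first digit at index i: A's loop produces take i ++ ' ' :: drop i
theorem pvFoldA_some (l : List Char) (acc : List Char) (i : Nat)
    (h : l.findIdx? PySem.Chars.isdigit = some i) :
    l.foldl pvStepA (acc, false) = (acc ++ l.take i ++ ' ' :: l.drop i, true) := by
  induction l generalizing acc i with
  | nil => simp at h
  | cons c cs ih =>
    rw [List.findIdx?_cons] at h
    by_cases hc : PySem.Chars.isdigit c = true
    · simp only [hc, ite_true, Option.some.injEq] at h
      subst h
      simp [List.foldl_cons, pvStepA, hc, pvFoldA_true]
    · simp only [hc, Bool.false_eq_true, ite_false, Option.map_eq_some_iff] at h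
      obtain ⟨j, hj, rfl⟩ := h
      simp only [List.foldl_cons, pvStepA, hc, Bool.false_and, Bool.false_eq_true, if_neg,
        not_false_eq_true]
      rw [ih (acc ++ [c]) j hj]
      simp

-- ===== VERDICT (by name: the statement is the Claim_ definition above) =====
theorem insert_space_before_number_spec : Claim_equal_insert_space_before_number := by
  intro word _
  unfold Spec_insert_space_before_number insert_space_before_number insert_space_before_number_alt
  by_cases hd : PySem.Str.strIsdigit word = true
  · simp only [hd, ite_true]
  · simp only [hd, Bool.false_eq_true, ite_false]
    cases h : word.toList.findIdx? PySem.Chars.isdigit with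
    | none => rw [pvFoldA_none _ _ h]; exact String.ofList_toList
    | some i => rw [pvFoldA_some _ _ _ h]; simp
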